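-- pv_equiv track=rewrite | github.com/MateuszSudejko/2SATsolver | main.py | check_satisfiability
-- ===== SOURCE A (Python) =====
-- def check_satisfiability(num_vars, sccs):
--     """Check if the 2SAT formula is satisfiable by ensuring no variable and its negation are in the same SCC."""
--     for scc in sccs:
--         # Convert node indices to variable indices
--         var_set = set()
--         for node in scc:
--             var = node // 2
--             is_negated = node % 2 == 1
--             var_set.add((var, is_negated))
--
--         # Check if any variable and its negation are in the same SCC
--         for var, is_negated in var_set:
--             if (var, not is_negated) in var_set:
--                 return False
--
--     return True
-- ===== SOURCE B (Python) =====
-- def check_satisfiability(num_vars, sccs):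
--     """Check if the 2SAT formula is satisfiable: within each SCC, no variable
--     may occur with both polarities.  Single early-exiting pass per SCC."""
--     for scc in sccs:
--         seen = {}
--         for node in scc:
--             var = node // 2
--             pol = node % 2
--             prev = seen.get(var)
--             if prev is not None and prev != pol:
--                 return False
--             seen[var] = pol
--     return True
-- ===== Notes on version B (the rewrite author's own statement) =====
-- stated objective: alternative
-- what changed: A builds the full (var, polarity) set for each SCC and then rescans it for a complementary pair; B makes one online pass per SCC keeping a dict var->polarity and returns False the moment a node's variable was already seen with the opposite polarity.
import Mathlib
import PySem

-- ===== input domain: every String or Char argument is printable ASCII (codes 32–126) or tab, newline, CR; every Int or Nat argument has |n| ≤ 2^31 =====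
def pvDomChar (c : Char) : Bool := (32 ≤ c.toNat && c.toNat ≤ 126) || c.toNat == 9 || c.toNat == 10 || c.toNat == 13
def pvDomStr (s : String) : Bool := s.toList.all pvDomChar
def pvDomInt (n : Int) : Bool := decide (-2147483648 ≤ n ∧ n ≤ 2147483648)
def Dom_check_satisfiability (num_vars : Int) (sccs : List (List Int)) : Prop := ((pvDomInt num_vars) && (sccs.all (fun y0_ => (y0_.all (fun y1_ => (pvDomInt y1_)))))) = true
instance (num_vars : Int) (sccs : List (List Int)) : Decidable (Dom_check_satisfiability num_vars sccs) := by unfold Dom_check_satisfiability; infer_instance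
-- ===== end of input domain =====

-- B replaces A's build-set-then-rescan per SCC by one early-exiting pass with a var->polarity dict (alternative decomposition, same cost).

-- ===== PORT A =====
-- per-SCC: build var_set, then scan it for a complementary pair ("return False" = true here)
def pvSccBad (scc : List Int) : Bool :=
  let var_set := scc.foldl
    (fun s n => PySem.Set.add s (PySem.Int.floordiv n 2, PySem.Int.mod n 2 == 1))
    PySem.Set.empty
  var_set.any (fun p => PySem.Set.contains var_set (p.1, !p.2))

def pvALoop : List (List Int) → Bool
  | [] => true
  | scc :: rest => if pvSccBad scc then false else pvALoop rest

def check_satisfiability (num_vars : Int) (sccs : List (List Int)) : Bool :=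
  pvALoop sccs

-- ===== PORT B =====
-- per-SCC: one pass; seen maps variable -> polarity; false the moment a conflict shows up
def pvBScan : List Int → PySem.Dict Int Int → Bool
  | [], _ => true
  | n :: rest, seen =>
    let v := PySem.Int.floordiv n 2
    let p := PySem.Int.mod n 2
    match seen.get? v with
    | some q => if q ≠ p then false else pvBScan rest (seen.insert v p)
    | none => pvBScan rest (seen.insert v p)

def pvBLoop : List (List Int) → Bool
  | [] => true
  | scc :: rest => if pvBScan scc PySem.Dict.empty then pvBLoop rest else false

def check_satisfiability_alt (num_vars : Int) (sccs : List (List Int)) : Bool :=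
  pvBLoop sccs

-- ===== PRECONDITION & SPEC =====
def Spec_check_satisfiability (num_vars : Int) (sccs : List (List Int)) (out : Bool) : Prop := out = check_satisfiability_alt num_vars sccs
instance (num_vars : Int) (sccs : List (List Int)) (out : Bool) : Decidable (Spec_check_satisfiability num_vars sccs out) := by unfold Spec_check_satisfiability; infer_instance

-- ===== CLAIM (what is proved, stated in full; the proofs are below) =====
def Claim_equal_check_satisfiability : Prop := ∀ (num_vars : Int) (sccs : List (List Int)), Dom_check_satisfiability num_vars sccs → Spec_check_satisfiability num_vars sccs (check_satisfiability num_vars sccs)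

-- ===== LEMMAS AND PROOFS =====

-- proof-side abbreviations (Euclidean / and % agree with Python's // and % for divisor 2)
def pvFd (n : Int) : Int := n / 2
def pvMd (n : Int) : Int := n % 2

theorem pvFd_eq (n : Int) : PySem.Int.floordiv n 2 = pvFd n :=
  PySem.Int.floordiv_eq_ediv_of_pos (by norm_num)

theorem pvMd_eq (n : Int) : PySem.Int.mod n 2 = pvMd n :=
  PySem.Int.mod_eq_emod_of_pos (by norm_num)

theorem pvMd_mem (n : Int) : pvMd n = 0 ∨ pvMd n = 1 := by
  unfold pvMd; omega

-- the order-independent per-SCC specification: all occurrences of a variable have one polarity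
def pvOk (l : List Int) : Prop :=
  ∀ n ∈ l, ∀ m ∈ l, pvFd m = pvFd n → pvMd m = pvMd n

theorem pvPol_iff (n m : Int) : ((pvMd m == 1) = !(pvMd n == 1)) ↔ pvMd m ≠ pvMd n := by
  rcases pvMd_mem n with h | h <;> rcases pvMd_mem m with h' | h' <;> rw [h, h'] <;> simp

theorem pvSccBad_iff (scc : List Int) :
    pvSccBad scc = true ↔ ∃ n ∈ scc, ∃ m ∈ scc, pvFd m = pvFd n ∧ pvMd m ≠ pvMd n := by
  unfold pvSccBad
  simp only [List.any_eq_true, PySem.Set.contains_iff, PySem.Set.mem_foldl_add,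
    PySem.Set.empty, List.not_mem_nil, false_or, pvFd_eq, pvMd_eq]
  constructor
  · rintro ⟨p, ⟨n, hn, rfl⟩, m, hm, hk⟩
    rw [Prod.mk.injEq] at hk
    exact ⟨n, hn, m, hm, hk.1.symm, (pvPol_iff n m).1 hk.2.symm⟩
  · rintro ⟨n, hn, m, hm, hfd, hmd⟩
    refine ⟨(pvFd n, pvMd n == 1), ⟨n, hn, rfl⟩, m, hm, ?_⟩
    rw [Prod.mk.injEq]
    exact ⟨hfd.symm, ((pvPol_iff n m).2 hmd).symm⟩

def pvOkD (D : PySem.Dict Int Int) (l : List Int) : Prop :=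
  (∀ n ∈ l, ∀ q, D.get? (pvFd n) = some q → q = pvMd n) ∧ pvOk l

theorem pvBScan_cons (n : Int) (rest : List Int) (D : PySem.Dict Int Int) :
    pvBScan (n :: rest) D = true ↔
      (∀ q, D.get? (pvFd n) = some q → q = pvMd n) ∧
      pvBScan rest (D.insert (pvFd n) (pvMd n)) = true := by
  simp only [pvBScan, pvFd_eq, pvMd_eq]
  rcases hget : D.get? (pvFd n) with _ | q
  · simp only []
    constructor
    · intro h
      exact ⟨(fun q' hq' => nomatch hq'), h⟩
    · rintro ⟨_, hs⟩; exact hs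
  · simp only []
    constructor
    · intro h
      by_cases hq : q = pvMd n
      · subst hq
        rw [if_neg (by simp)] at h
        exact ⟨(fun q' hq' => (Option.some.inj hq').symm), h⟩
      · rw [if_pos hq] at h; cases h
    · rintro ⟨hc, hs⟩
      have hq : q = pvMd n := hc q rfl
      subst hq
      rw [if_neg (by simp)]
      exact hs

theorem pvBScan_iff (scc : List Int) (D : PySem.Dict Int Int) :
    pvBScan scc D = true ↔ pvOkD D scc := by
  induction scc generalizing D with
  | nil => simp [pvBScan, pvOkD, pvOk]
  | cons n rest ih =>
    rw [pvBScan_cons]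
    constructor
    · rintro ⟨hcond, hrest⟩
      obtain ⟨h1, h2⟩ := (ih _).1 hrest
      refine ⟨?_, ?_⟩
      · intro x hx q hq
        rcases List.mem_cons.1 hx with rfl | hx'
        · exact hcond q hq
        · by_cases hfd : pvFd x = pvFd n
          · have hx1 : pvMd n = pvMd x :=
              h1 x hx' (pvMd n) (by rw [PySem.Dict.get?_insert, if_pos hfd])
            have hqn : q = pvMd n := hcond q (hfd ▸ hq)
            omega
          · exact h1 x hx' q (by rw [PySem.Dict.get?_insert, if_neg hfd]; exact hq)
      · intro a ha b hb hfd
        rcases List.mem_cons.1 ha with rfl | ha' <;> rcases List.mem_cons.1 hb with rfl | hb'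
        · rfl
        · exact (h1 b hb' (pvMd a) (by rw [PySem.Dict.get?_insert, if_pos hfd])).symm
        · exact h1 a ha' (pvMd b) (by rw [PySem.Dict.get?_insert, if_pos hfd.symm]) |>.symm ▸ rfl
        · exact h2 a ha' b hb' hfd
    · rintro ⟨h1, h2⟩
      have hcond : ∀ q, D.get? (pvFd n) = some q → q = pvMd n := h1 n List.mem_cons_self
      refine ⟨hcond, (ih _).2 ⟨?_, ?_⟩⟩
      · intro x hx q hq
        rw [PySem.Dict.get?_insert] at hq
        by_cases hfd : pvFd x = pvFd n
        · rw [if_pos hfd] at hq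
          have hmd := h2 n List.mem_cons_self x (List.mem_cons_of_mem _ hx) hfd
          have : pvMd n = q := Option.some.inj hq
          omega
        · rw [if_neg hfd] at hq
          exact h1 x (List.mem_cons_of_mem _ hx) q hq
      · intro a ha b hb hfd
        exact h2 a (List.mem_cons_of_mem _ ha) b (List.mem_cons_of_mem _ hb) hfd

theorem pvScc_agree (scc : List Int) :
    pvSccBad scc = !pvBScan scc PySem.Dict.empty := by
  rcases hb : pvBScan scc PySem.Dict.empty with _ | _
  · have hnot : ¬ pvOkD PySem.Dict.empty scc := fun h => by
      rw [(pvBScan_iff scc PySem.Dict.empty).2 h] at hb; cases hb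
    have hnot' : ¬ pvOk scc := fun h =>
      hnot ⟨(fun n _ q hq => by rw [PySem.Dict.get?_empty] at hq; cases hq), h⟩
    unfold pvOk at hnot'
    push_neg at hnot'
    obtain ⟨n, hn, m, hm, hfd, hmd⟩ := hnot'
    simp [(pvSccBad_iff scc).2 ⟨n, hn, m, hm, hfd, hmd⟩]
  · have hok := (pvBScan_iff scc PySem.Dict.empty).1 hb
    rcases hbad : pvSccBad scc with _ | _
    · rfl
    · obtain ⟨n, hn, m, hm, hfd, hmd⟩ := (pvSccBad_iff scc).1 hbad
      exact absurd (hok.2 n hn m hm hfd) hmd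

theorem pvLoop_agree (sccs : List (List Int)) : pvALoop sccs = pvBLoop sccs := by
  induction sccs with
  | nil => rfl
  | cons scc rest ih =>
    simp only [pvALoop, pvBLoop, pvScc_agree, ih]
    cases pvBScan scc PySem.Dict.empty <;> simp

-- ===== VERDICT (by name: the statement is the Claim_ definition above) =====
theorem check_satisfiability_spec : Claim_equal_check_satisfiability := by
  intro num_vars sccs _
  unfold Spec_check_satisfiability check_satisfiability check_satisfiability_alt
  exact pvLoop_agree sccs
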